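-- pv_equiv track=rewrite | github.com/andreipehas/advent_of_code | day11/solution_2.py | detect_galaxies
-- ===== SOURCE A (Python) =====
-- from itertools import accumulate, combinations
-- from typing import List, Tuple
--
-- def detect_galaxies(lines: List[List[int]]) -> List[int]:
--   galaxy_on_line, galaxy_on_column = [999999] * len(lines[0]), [999999] * len(lines)
--   for i in range(len(lines)):
--     for j in range(len(lines[0])):
--       if lines[i][j] == '#':
--         galaxy_on_line[i] = 0
--         galaxy_on_column[j] = 0
--
--   offset_lines = list(accumulate(galaxy_on_line))
--   offset_columns = list(accumulate(galaxy_on_column))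
--   galaxies = []
--
--   for i in range(len(lines)):
--     for j in range(len(lines[0])):
--       if lines[i][j] == '#':
--         galaxies.append((i + offset_lines[i], j + offset_columns[j]))
--
--   return galaxies
-- ===== SOURCE B (Python) =====
-- from bisect import bisect_right
--
-- def detect_galaxies(lines):
--   W = len(lines[0])
--   empty_rows = [i for i, row in enumerate(lines) if '#' not in row[:W]]
--   empty_cols = [j for j in range(W) if all(row[j] != '#' for row in lines)]
--   return [(i + 999999 * bisect_right(empty_rows, i),
--            j + 999999 * bisect_right(empty_cols, j))
--           for i, row in enumerate(lines) for j in range(W) if row[j] == '#']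
-- ===== Notes on version B (the rewrite author's own statement) =====
-- stated objective: simpler
-- what changed: B drops A's two 999999-marking arrays and itertools.accumulate prefix sums, instead building sorted lists of the empty row/column indices in one comprehension each and locating each galaxy's offset with bisect_right (count of empty indices before it).
import Mathlib
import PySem

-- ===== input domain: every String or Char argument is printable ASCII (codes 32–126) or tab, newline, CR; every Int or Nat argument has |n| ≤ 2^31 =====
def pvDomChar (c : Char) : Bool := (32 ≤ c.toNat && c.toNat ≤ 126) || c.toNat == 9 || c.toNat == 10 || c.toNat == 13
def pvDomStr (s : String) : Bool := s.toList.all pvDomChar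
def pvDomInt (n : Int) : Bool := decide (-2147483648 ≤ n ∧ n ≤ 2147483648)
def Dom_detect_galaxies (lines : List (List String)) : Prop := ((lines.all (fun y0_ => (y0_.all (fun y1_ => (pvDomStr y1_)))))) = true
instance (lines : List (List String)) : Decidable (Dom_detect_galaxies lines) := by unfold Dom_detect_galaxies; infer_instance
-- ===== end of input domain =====

-- B replaces A's 999999-marking arrays and accumulate prefix sums by direct lists of empty
-- row/column indices queried with bisect_right (ported as a count of elements ≤ i): simpler.

-- ===== PORT A =====
-- itertools.accumulate (running sums), exact
def pvAccum : Int → List Int → List Int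
  | _, [] => []
  | s, x :: xs => (s + x) :: pvAccum (s + x) xs

def detect_galaxies (lines : List (List String)) : List (Int × Int) :=
  let H := lines.length
  let W := (lines.headD []).length
  -- nested marking loops; list assignment a[i] = 0 as List.set (indices in range under Pre_)
  let st := (List.range H).foldl (fun (st : List Int × List Int) i =>
      (List.range W).foldl (fun (st : List Int × List Int) j =>
        if (lines.getD i []).getD j "" == "#" then (st.1.set i 0, st.2.set j 0) else st) st)
    (List.replicate W (999999 : Int), List.replicate H (999999 : Int))
  let offset_lines := pvAccum 0 st.1
  let offset_columns := pvAccum 0 st.2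
  (List.range H).foldl (fun acc i =>
    (List.range W).foldl (fun acc j =>
      if (lines.getD i []).getD j "" == "#" then
        acc ++ [((i : Int) + offset_lines.getD i 0, (j : Int) + offset_columns.getD j 0)]
      else acc) acc) []

-- ===== PORT B =====
def detect_galaxies_alt (lines : List (List String)) : List (Int × Int) :=
  let W := (lines.headD []).length
  -- row[:W] is List.take W (W ≥ 0); '#' not in … is ! contains
  let empty_rows := (List.range lines.length).filter
      (fun i => !((lines.getD i []).take W).contains "#")
  let empty_cols := (List.range W).filter
      (fun j => lines.all (fun row => row.getD j "" != "#"))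
  -- bisect_right xs v on a sorted ascending list = number of elements ≤ v (exact)
  (List.range lines.length).flatMap (fun i =>
    ((List.range W).filter (fun j => (lines.getD i []).getD j "" == "#")).map
      (fun (j : Nat) => ((i : Int) + 999999 * (empty_rows.countP (fun r => decide (r ≤ i)) : Int),
                 (j : Int) + 999999 * (empty_cols.countP (fun c => decide (c ≤ j)) : Int))))

-- ===== PRECONDITION & SPEC =====
-- Pre_ is exactly the inputs where A returns: lines nonempty, every row at least as long as the
-- first (else lines[i][j] raises IndexError), and every '#' at (i,j) has i < W and j < H (else
-- A's mis-sized marking arrays galaxy_on_line/galaxy_on_column raise IndexError).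
def Pre_detect_galaxies (lines : List (List String)) : Prop :=
  lines ≠ [] ∧
  (∀ row ∈ lines, (lines.headD []).length ≤ row.length) ∧
  (∀ i < lines.length, ∀ j < (lines.headD []).length,
    (lines.getD i []).getD j "" = "#" → i < (lines.headD []).length ∧ j < lines.length)
instance (lines : List (List String)) : Decidable (Pre_detect_galaxies lines) := by
  unfold Pre_detect_galaxies; infer_instance

def pvWitness_detect_galaxies : List (List String) := [["#", "."], [".", "#"]]

def Spec_detect_galaxies (lines : List (List String)) (out : List (Int × Int)) : Prop := out = detect_galaxies_alt lines
instance (lines : List (List String)) (out : List (Int × Int)) : Decidable (Spec_detect_galaxies lines out) := by unfold Spec_detect_galaxies; infer_instance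

-- ===== CLAIM (what is proved, stated in full; the proofs are below) =====
def Claim_equal_detect_galaxies : Prop := ∀ (lines : List (List String)), Dom_detect_galaxies lines → Pre_detect_galaxies lines → Spec_detect_galaxies lines (detect_galaxies lines)

-- ===== LEMMAS AND PROOFS =====

-- the inner marking loop: effect on the first component
theorem pv_inner_fst (h : Nat → Nat → Bool) (i : Nat) (js : List Nat) (st : List Int × List Int) :
    (js.foldl (fun st j => if h i j then (st.1.set i 0, st.2.set j 0) else st) st).1
      = if js.any (h i) then st.1.set i 0 else st.1 := by
  induction js generalizing st with
  | nil => simp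
  | cons j js ih =>
    simp only [List.foldl_cons, List.any_cons]
    by_cases hj : h i j = true
    · simp [hj, ih, List.set_set]
    · simp only [Bool.not_eq_true] at hj
      simp [hj, ih]

-- the inner marking loop: effect on the second component
theorem pv_inner_snd (h : Nat → Nat → Bool) (i : Nat) (js : List Nat) (st : List Int × List Int) :
    (js.foldl (fun st j => if h i j then (st.1.set i 0, st.2.set j 0) else st) st).2
      = js.foldl (fun col j => if h i j then col.set j 0 else col) st.2 := by
  induction js generalizing st with
  | nil => rfl
  | cons j js ih =>
    by_cases hj : h i j = true <;> simp [hj, ih]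

theorem pv_outer_fst (h : Nat → Nat → Bool) (rows js : List Nat) (st : List Int × List Int) :
    (rows.foldl (fun st i => js.foldl (fun st j =>
        if h i j then (st.1.set i 0, st.2.set j 0) else st) st) st).1
      = rows.foldl (fun gl i => if js.any (h i) then gl.set i 0 else gl) st.1 := by
  induction rows generalizing st with
  | nil => rfl
  | cons r rows ih => simp only [List.foldl_cons, ih, pv_inner_fst]

theorem pv_outer_snd (h : Nat → Nat → Bool) (rows js : List Nat) (st : List Int × List Int) :
    (rows.foldl (fun st i => js.foldl (fun st j =>
        if h i j then (st.1.set i 0, st.2.set j 0) else st) st) st).2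
      = rows.foldl (fun col i => js.foldl (fun col j =>
          if h i j then col.set j 0 else col) col) st.2 := by
  induction rows generalizing st with
  | nil => rfl
  | cons r rows ih => simp only [List.foldl_cons, ih, pv_inner_snd]

theorem pv_getD_set (l : List Int) (r k : Nat) (v : Int) :
    (l.set r v).getD k 0 = if r = k ∧ r < l.length then v else l.getD k 0 := by
  simp only [List.getD_eq_getElem?_getD, List.getElem?_set]
  split_ifs with h1 h2 h3 h4 <;> simp_all <;> omega

theorem pv_fold_set_len (p : Nat → Bool) (rows : List Nat) (l : List Int) :
    (rows.foldl (fun gl i => if p i then gl.set i 0 else gl) l).length = l.length := by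
  induction rows generalizing l with
  | nil => rfl
  | cons r rows ih => by_cases hr : p r = true <;> simp [hr, ih]

theorem pv_fold_set_getD (p : Nat → Bool) (rows : List Nat) (l : List Int) (k : Nat) :
    (rows.foldl (fun gl i => if p i then gl.set i 0 else gl) l).getD k 0
      = if k ∈ rows ∧ p k ∧ k < l.length then 0 else l.getD k 0 := by
  induction rows generalizing l with
  | nil => simp
  | cons r rows ih =>
    simp only [List.foldl_cons]
    by_cases hp : p r = true
    · simp only [hp, if_true, ih, List.length_set, pv_getD_set]
      by_cases h1 : k ∈ rows ∧ p k = true ∧ k < l.length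
      · simp [h1, List.mem_cons]
      · simp only [h1, if_false]
        by_cases h2 : r = k
        · subst h2
          by_cases h3 : r < l.length <;> simp_all [List.mem_cons]
        · simp [h2, List.mem_cons]
          intro hk hpk hlen
          rcases hk with rfl | hk
          · exact absurd rfl h2
          · exact absurd ⟨hk, hpk, hlen⟩ h1
    · simp only [hp, ih, List.mem_cons, if_false, Bool.false_eq_true]
      by_cases h2 : r = k
      · subst h2; simp [hp]
      · have : (k = r ∨ k ∈ rows) ∧ p k = true ∧ k < l.length
            ↔ k ∈ rows ∧ p k = true ∧ k < l.length := by
          constructor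
          · rintro ⟨rfl | hk, h⟩
            · exact absurd h.1 (by simpa using hp)
            · exact ⟨hk, h⟩
          · exact fun ⟨hk, h⟩ => ⟨Or.inr hk, h⟩
        simp only [this]

theorem pv_fold_set2_len (h : Nat → Nat → Bool) (rows cols : List Nat) (l : List Int) :
    (rows.foldl (fun col i => cols.foldl (fun col j =>
        if h i j then col.set j 0 else col) col) l).length = l.length := by
  induction rows generalizing l with
  | nil => rfl
  | cons r rows ih => simp only [List.foldl_cons, ih, pv_fold_set_len]

theorem pv_fold_set2_getD (h : Nat → Nat → Bool) (rows cols : List Nat) (l : List Int) (k : Nat) :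
    (rows.foldl (fun col i => cols.foldl (fun col j =>
        if h i j then col.set j 0 else col) col) l).getD k 0
      = if (∃ i ∈ rows, h i k) ∧ k ∈ cols ∧ k < l.length then 0 else l.getD k 0 := by
  induction rows generalizing l with
  | nil => simp
  | cons r rows ih =>
    simp only [List.foldl_cons, ih, pv_fold_set_len, pv_fold_set_getD]
    by_cases h1 : (∃ i ∈ rows, h i k = true) ∧ k ∈ cols ∧ k < l.length
    · have hA : (∃ i ∈ r :: rows, h i k = true) ∧ k ∈ cols ∧ k < l.length := by
        obtain ⟨⟨i, hi, hik⟩, hkc, hkl⟩ := h1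
        exact ⟨⟨i, List.mem_cons_of_mem r hi, hik⟩, hkc, hkl⟩
      rw [if_pos h1, if_pos hA]
    · rw [if_neg h1]
      by_cases h2 : k ∈ cols ∧ h r k = true ∧ k < l.length
      · have hA : (∃ i ∈ r :: rows, h i k = true) ∧ k ∈ cols ∧ k < l.length :=
          ⟨⟨r, List.mem_cons_self .., h2.2.1⟩, h2.1, h2.2.2⟩
        rw [if_pos h2, if_pos hA]
      · rw [if_neg h2]
        have : ¬ ((∃ i ∈ r :: rows, h i k = true) ∧ k ∈ cols ∧ k < l.length) := by
          rintro ⟨⟨i, hi, hik⟩, hkc, hkl⟩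
          rcases List.mem_cons.mp hi with rfl | hi
          · exact h2 ⟨hkc, hik, hkl⟩
          · exact h1 ⟨⟨i, hi, hik⟩, hkc, hkl⟩
        rw [if_neg this]

theorem pv_accum_getD (l : List Int) (s : Int) (i : Nat) (h : i < l.length) :
    (pvAccum s l).getD i 0 = s + (l.take (i + 1)).sum := by
  induction l generalizing s i with
  | nil => simp at h
  | cons x xs ih =>
    cases i with
    | zero => simp [pvAccum]
    | succ n =>
      simp only [pvAccum, List.getD_cons_succ, List.take_succ_cons, List.sum_cons]
      rw [ih (s + x) n (by simpa using h)]
      ring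

theorem pv_sum_ite (q : Nat → Bool) (c : Int) (l : List Nat) :
    (l.map (fun k => if q k then (0 : Int) else c)).sum
      = c * (l.countP (fun k => !q k) : Int) := by
  induction l with
  | nil => simp
  | cons x xs ih =>
    by_cases hx : q x = true <;> simp [List.countP_cons, hx, ih] <;> ring

theorem pv_countP_range_le (p : Nat → Bool) (n i : Nat) (h : i < n) :
    (List.range n).countP (fun k => p k && decide (k ≤ i))
      = (List.range (i + 1)).countP p := by
  obtain ⟨m, rfl⟩ : ∃ m, n = (i + 1) + m := ⟨n - (i + 1), by omega⟩
  rw [List.range_add, List.countP_append]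
  have h2 : ((List.range m).map (fun a => (i + 1) + a)).countP
      (fun k => p k && decide (k ≤ i)) = 0 := by
    rw [List.countP_eq_zero]
    intro x hx
    simp only [List.mem_map, List.mem_range] at hx
    obtain ⟨a, _, rfl⟩ := hx
    simp
    omega
  rw [h2, Nat.add_zero]
  apply List.countP_congr
  intro x hx
  simp only [List.mem_range] at hx
  simp [Nat.lt_succ_iff.mp hx]

-- the final galaxy_on_line as an explicit list
theorem pv_fold_set_eq_map (p : Nat → Bool) (n W : Nat) (v : Int) :
    (List.range n).foldl (fun gl r => if p r then gl.set r 0 else gl) (List.replicate W v)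
      = (List.range W).map (fun k => if decide (k < n) && p k then 0 else v) := by
  apply List.ext_getElem
  · simp [pv_fold_set_len]
  · intro k hk hk'
    have hkW : k < W := by simpa [pv_fold_set_len] using hk
    rw [← List.getD_eq_getElem _ 0 hk, pv_fold_set_getD]
    simp [List.mem_range, hkW, and_comm]

-- the final galaxy_on_column as an explicit list
theorem pv_fold_set2_eq_map (h : Nat → Nat → Bool) (n W H : Nat) (v : Int) :
    (List.range n).foldl (fun col i => (List.range W).foldl (fun col j =>
        if h i j then col.set j 0 else col) col) (List.replicate H v)
      = (List.range H).map (fun c =>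
          if (List.range n).any (fun i => h i c) && decide (c < W) then 0 else v) := by
  apply List.ext_getElem
  · simp [pv_fold_set2_len]
  · intro k hk hk'
    have hkH : k < H := by simpa [pv_fold_set2_len] using hk
    rw [← List.getD_eq_getElem _ 0 hk, pv_fold_set2_getD]
    simp only [List.mem_range, List.length_replicate, List.getElem_map, List.getElem_range,
      List.getD_replicate, hkH, and_true]
    by_cases hex : ∃ i ∈ List.range n, h i k = true
    · have : (List.range n).any (fun i => h i k) = true := List.any_eq_true.mpr (by
        obtain ⟨i, hi, hik⟩ := hex; exact ⟨i, hi, hik⟩)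
      simp_all [List.mem_range]
    · have : (List.range n).any (fun i => h i k) = false := by
        rw [List.any_eq_false]; intro i hi
        simp only [List.mem_range] at hi ⊢
        exact fun hc => hex ⟨i, List.mem_range.mpr hi, hc⟩
      simp_all [List.mem_range]

-- '#' in row[:W]  =  any of the first W cells equals '#'   (needs W ≤ len(row))
theorem pv_contains_take (row : List String) (W : Nat) (hW : W ≤ row.length) :
    (row.take W).contains "#" = (List.range W).any (fun j => row.getD j "" == "#") := by
  rw [Bool.eq_iff_iff]
  simp only [List.contains_iff_mem, List.any_eq_true, List.mem_range, beq_iff_eq]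
  constructor
  · intro hmem
    obtain ⟨j, hj, hval⟩ := List.mem_iff_getElem.mp hmem
    have hjW : j < W := by simpa [Nat.min_eq_left hW] using hj
    refine ⟨j, hjW, ?_⟩
    rw [List.getD_eq_getElem _ _ (lt_of_lt_of_le hjW hW)]
    rw [List.getElem_take] at hval
    exact hval
  · rintro ⟨j, hjW, hval⟩
    rw [List.getD_eq_getElem _ _ (lt_of_lt_of_le hjW hW)] at hval
    apply List.mem_iff_getElem.mpr
    exact ⟨j, by simp [Nat.min_eq_left hW, hjW, lt_of_lt_of_le hjW hW], by
      rw [List.getElem_take]; exact hval⟩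

-- all(row[j] != '#' for row in lines)  =  no row index hits '#' in column j
theorem pv_all_col (lines : List (List String)) (c : Nat) :
    lines.all (fun row => row.getD c "" != "#")
      = !(List.range lines.length).any (fun i => (lines.getD i []).getD c "" == "#") := by
  rw [Bool.eq_iff_iff]
  simp only [List.all_eq_true, bne_iff_ne, Bool.not_eq_true', List.any_eq_false,
    List.mem_range, beq_iff_eq, ne_eq]
  constructor
  · intro hall i hi
    have : lines.getD i [] ∈ lines := by
      rw [List.getD_eq_getElem _ _ hi]; exact List.getElem_mem hi
    exact hall _ this
  · intro hall row hrow
    obtain ⟨i, hi, hval⟩ := List.mem_iff_getElem.mp hrow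
    have := hall i hi
    rwa [List.getD_eq_getElem _ _ hi, hval] at this

-- ===== VERDICT (by name: the statement is the Claim_ definition above) =====
theorem detect_galaxies_spec : Claim_equal_detect_galaxies := by
  intro lines _ hpre
  obtain ⟨hne, hlen, hgal⟩ := hpre
  unfold Spec_detect_galaxies detect_galaxies detect_galaxies_alt
  simp only [pv_outer_fst, pv_outer_snd, PySem.List.foldl_append_if,
    PySem.List.foldl_append_eq_flatMap, List.nil_append, List.flatMap_def]
  refine congrArg List.flatten (List.map_congr_left ?_)
  intro i hi
  simp only [List.mem_range] at hi
  apply List.map_congr_left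
  intro j hj
  obtain ⟨hjr, hij⟩ := List.mem_filter.mp hj
  simp only [List.mem_range] at hjr
  have hij' : (lines.getD i []).getD j "" = "#" := by simpa using hij
  obtain ⟨hiW, hjH⟩ := hgal i hi j hjr hij'
  -- abbreviations
  have hW : (List.replicate (lines.headD []).length (999999 : Int)).length
      = (lines.headD []).length := List.length_replicate
  -- row offset
  rw [pv_fold_set_eq_map, pv_fold_set2_eq_map]
  rw [pv_accum_getD _ _ i (by simpa using hiW), pv_accum_getD _ _ j (by simpa using hjH)]
  rw [← List.map_take, List.take_range, Nat.min_eq_left (by omega),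
      ← List.map_take, List.take_range, Nat.min_eq_left (by omega)]
  rw [pv_sum_ite, pv_sum_ite]
  rw [List.countP_filter, List.countP_filter]
  have hrowcnt :
      (List.range lines.length).countP
          (fun r => decide (r ≤ i) && !((lines.getD r []).take (lines.headD []).length).contains "#")
        = (List.range (i + 1)).countP
          (fun k => !(decide (k < lines.length)
              && (List.range (lines.headD []).length).any (fun j => (lines.getD k []).getD j "" == "#"))) := by
    rw [List.countP_congr (fun x _ => by rw [Bool.and_comm]), pv_countP_range_le _ _ _ hi]
    apply List.countP_congr
    intro k hk
    simp only [List.mem_range] at hk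
    have hkH : k < lines.length := by omega
    have hmem : lines.getD k [] ∈ lines := by
      rw [List.getD_eq_getElem _ _ hkH]; exact List.getElem_mem hkH
    rw [pv_contains_take _ _ (hlen _ hmem)]
    simp [hkH]
  have hcolcnt :
      (List.range (lines.headD []).length).countP
          (fun c => decide (c ≤ j) && lines.all (fun row => row.getD c "" != "#"))
        = (List.range (j + 1)).countP
          (fun c => !((List.range lines.length).any (fun i => (lines.getD i []).getD c "" == "#")
              && decide (c < (lines.headD []).length))) := by
    rw [List.countP_congr (fun x _ => by rw [Bool.and_comm]), pv_countP_range_le _ _ _ hjr]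
    apply List.countP_congr
    intro c hc
    simp only [List.mem_range] at hc
    have hcW : c < (lines.headD []).length := by omega
    rw [pv_all_col]
    have hd : decide (c < (lines.headD []).length) = true := by simpa using hcW
    rw [hd, Bool.and_true]
  rw [hrowcnt, hcolcnt]
  ring_nf
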